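-- pv_equiv track=rewrite | github.com/Albertleh/statistik-at-trade-api | app/ingest.py | _find_month_index
-- ===== SOURCE A (Python) =====
-- from typing import Dict, List, Optional
--
-- def _find_month_index(data_rows: List[List[str]], header: List[str]) -> Optional[int]:
--     """Detect a month column (1-12) when year-only periods are provided."""
--     for idx, _ in enumerate(header):
--         sample_values = [
--             row[idx].strip()
--             for row in data_rows[:200]
--             if idx < len(row) and row[idx].strip()
--         ]
--         if not sample_values:
--             continue
--         if all(value.isdigit() and 1 <= int(value) <= 12 for value in sample_values):
--             return idx
--     return None
-- ===== SOURCE B (Python) =====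
-- from typing import Dict, List, Optional
--
--
-- def _find_month_index(data_rows: List[List[str]], header: List[str]) -> Optional[int]:
--     """Detect a month column (1-12) when year-only periods are provided.
--
--     Row-major single pass over data_rows[:200] maintaining per-column
--     seen_any / still_valid flags, then return the first seen-and-valid column.
--     """
--     n = len(header)
--     seen = [False] * n
--     valid = [True] * n
--     for row in data_rows[:200]:
--         for idx in range(min(n, len(row))):
--             cell = row[idx].strip()
--             if cell:
--                 seen[idx] = True
--                 if valid[idx]:
--                     valid[idx] = cell.isdigit() and 1 <= int(cell) <= 12
--     for idx in range(n):
--         if seen[idx] and valid[idx]: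
--             return idx
--     return None
-- ===== Notes on version B (the rewrite author's own statement) =====
-- stated objective: faster
-- what changed: Replaces the column-major scan that rebuilds a stripped sample list per header column with one row-major pass over data_rows[:200] maintaining per-column seen_any/still_valid flag arrays, followed by a scan for the first seen-and-valid column.
import Mathlib
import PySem

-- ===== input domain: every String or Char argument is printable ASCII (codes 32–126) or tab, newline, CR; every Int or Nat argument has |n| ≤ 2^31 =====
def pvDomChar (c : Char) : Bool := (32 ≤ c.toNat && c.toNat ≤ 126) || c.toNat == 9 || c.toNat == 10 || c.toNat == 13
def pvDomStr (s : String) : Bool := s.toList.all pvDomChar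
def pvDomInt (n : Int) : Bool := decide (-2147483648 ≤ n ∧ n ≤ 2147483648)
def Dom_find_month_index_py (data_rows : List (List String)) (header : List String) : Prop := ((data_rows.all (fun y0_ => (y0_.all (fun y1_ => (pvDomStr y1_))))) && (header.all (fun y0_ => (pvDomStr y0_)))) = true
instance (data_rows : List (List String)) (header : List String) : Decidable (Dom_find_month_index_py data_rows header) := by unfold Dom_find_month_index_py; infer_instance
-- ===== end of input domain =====

-- B replaces A's column-major per-column sample rebuilding with one row-major pass
-- maintaining per-column seen/valid flag arrays (objective: faster, constant-factor:
-- one strip per cell and no per-column sample lists or slices).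


-- ===== PORT A =====
-- the per-cell test `value.isdigit() and 1 <= int(value) <= 12` (both Pythons contain it verbatim)
def pvGood (v : String) : Bool :=
  PySem.Str.strIsdigit v &&
    (decide (1 ≤ (PySem.Int.ofStr? v).getD 0) && decide ((PySem.Int.ofStr? v).getD 0 ≤ 12))

-- the comprehension [row[idx].strip() for row in rows if idx < len(row) and row[idx].strip()]
def pvSample (rows : List (List String)) (idx : Nat) : List String :=
  rows.foldr (fun row acc =>
    if idx < row.length && !(PySem.Str.strip (row.getD idx "")).toList.isEmpty
    then PySem.Str.strip (row.getD idx "") :: acc else acc) []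

-- A's `for idx, _ in enumerate(header)` loop
def pvAFind (data_rows : List (List String)) : List Nat → Option Int
  | [] => none
  | idx :: rest =>
    let sample := pvSample (PySem.List.slice data_rows none (some 200)) idx
    if sample.isEmpty then pvAFind data_rows rest
    else if sample.all pvGood then some (idx : Int) else pvAFind data_rows rest

def find_month_index_py (data_rows : List (List String)) (header : List String) : Option Int :=
  pvAFind data_rows (List.range header.length)

-- ===== PORT B =====
-- the body of Source B's inner loop: one cell's flag-array update
def pvStepFn (row : List String) (sv : List Bool × List Bool) (idx : Nat) : List Bool × List Bool :=
  let cell := PySem.Str.strip (row.getD idx "")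
  if cell.toList.isEmpty then sv
  else (sv.1.set idx true,
        if sv.2.getD idx true then sv.2.set idx (pvGood cell) else sv.2)

-- Source B's inner `for idx in range(min(n, len(row)))` loop: flag-array updates for one row
def pvRowStep (n : Nat) (row : List String) (sv : List Bool × List Bool) : List Bool × List Bool :=
  (List.range (min n row.length)).foldl (pvStepFn row) sv

-- Source B's final `for idx in range(n)` scan
def pvScanB (sv : List Bool × List Bool) : List Nat → Option Int
  | [] => none
  | idx :: rest =>
    if sv.1.getD idx false && sv.2.getD idx true then some (idx : Int) else pvScanB sv rest

def find_month_index_py_alt (data_rows : List (List String)) (header : List String) : Option Int :=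
  pvScanB
    ((PySem.List.slice data_rows none (some 200)).foldl
      (fun sv row => pvRowStep header.length row sv)
      (List.replicate header.length false, List.replicate header.length true))
    (List.range header.length)

-- ===== PRECONDITION & SPEC =====
def Spec_find_month_index_py (data_rows : List (List String)) (header : List String) (out : Option Int) : Prop := out = find_month_index_py_alt data_rows header
instance (data_rows : List (List String)) (header : List String) (out : Option Int) : Decidable (Spec_find_month_index_py data_rows header out) := by unfold Spec_find_month_index_py; infer_instance

-- ===== CLAIM (what is proved, stated in full; the proofs are below) =====
def Claim_equal_find_month_index_py : Prop := ∀ (data_rows : List (List String)) (header : List String), Dom_find_month_index_py data_rows header → Spec_find_month_index_py data_rows header (find_month_index_py data_rows header)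

-- ===== LEMMAS AND PROOFS =====

-- pointwise view of one cell's effect on one column's (seen, valid) state
def pvUpdate (row : List String) (idx : Nat) (sv : Bool × Bool) : Bool × Bool :=
  let cell := if idx < row.length then PySem.Str.strip (row.getD idx "") else ""
  if cell.toList.isEmpty then sv
  else (true, sv.2 && pvGood cell)

-- column-local view of B's row fold
def pvColFold (rows : List (List String)) (idx : Nat) (sv : Bool × Bool) : Bool × Bool :=
  rows.foldl (fun sv row => pvUpdate row idx sv) sv

theorem pvStepFn_empty (row : List String) (sv : List Bool × List Bool) (idx : Nat)
    (hc : (PySem.Str.strip (row.getD idx "")).toList.isEmpty = true) :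
    pvStepFn row sv idx = sv := by
  simp only [pvStepFn]
  rw [if_pos hc]

theorem pvStepFn_nonempty (row : List String) (sv : List Bool × List Bool) (idx : Nat)
    (hc : (PySem.Str.strip (row.getD idx "")).toList.isEmpty = false) :
    pvStepFn row sv idx
      = (sv.1.set idx true,
         if sv.2.getD idx true then sv.2.set idx (pvGood (PySem.Str.strip (row.getD idx ""))) else sv.2) := by
  simp only [pvStepFn]
  rw [if_neg (show ¬ (PySem.Str.strip (row.getD idx "")).toList.isEmpty = true by rw [hc]; decide)]

theorem pvStepFn_lengths (row : List String) (sv : List Bool × List Bool) (idx : Nat) :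
    (pvStepFn row sv idx).1.length = sv.1.length ∧ (pvStepFn row sv idx).2.length = sv.2.length := by
  cases hc : (PySem.Str.strip (row.getD idx "")).toList.isEmpty with
  | true => rw [pvStepFn_empty row sv idx hc]; exact ⟨rfl, rfl⟩
  | false =>
    rw [pvStepFn_nonempty row sv idx hc]
    refine ⟨by simp, ?_⟩
    by_cases hb : sv.2.getD idx true
    · rw [if_pos hb]; simp
    · rw [if_neg hb]

theorem pvUpdate_in (row : List String) (idx : Nat) (h1 : idx < row.length) (sv : Bool × Bool) :
    pvUpdate row idx sv
      = if (PySem.Str.strip (row.getD idx "")).toList.isEmpty then sv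
        else (true, sv.2 && pvGood (PySem.Str.strip (row.getD idx ""))) := by
  simp only [pvUpdate]
  rw [if_pos h1]

theorem pvUpdate_out (row : List String) (idx : Nat) (h1 : ¬ idx < row.length) (sv : Bool × Bool) :
    pvUpdate row idx sv = sv := by
  simp only [pvUpdate]
  rw [if_neg h1]
  rfl

theorem pvRowFold_aux (row : List String) (n : Nat) (m : Nat) (hm : m ≤ min n row.length) :
    ∀ (se va : List Bool), se.length = n → va.length = n →
      ((List.range m).foldl (pvStepFn row) (se, va)).1.length = n ∧
      ((List.range m).foldl (pvStepFn row) (se, va)).2.length = n ∧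
      ∀ idx, idx < n →
        ((((List.range m).foldl (pvStepFn row) (se, va)).1.getD idx false),
          (((List.range m).foldl (pvStepFn row) (se, va)).2.getD idx true))
          = if idx < m then pvUpdate row idx (se.getD idx false, va.getD idx true)
            else (se.getD idx false, va.getD idx true) := by
  induction m with
  | zero =>
    intro se va hs hv
    exact ⟨by simpa using hs, by simpa using hv, fun idx hidx => by simp⟩
  | succ m ih =>
    intro se va hs hv
    have hm' : m ≤ min n row.length := by omega
    obtain ⟨ihs, ihv, ihp⟩ := ih hm' se va hs hv
    set r := (List.range m).foldl (pvStepFn row) (se, va) with hr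
    have hstep : (List.range (m + 1)).foldl (pvStepFn row) (se, va) = pvStepFn row r m := by
      rw [List.range_succ, List.foldl_append, List.foldl_cons, List.foldl_nil]
    have hmn : m < n := by omega
    have hmr : m < row.length := by omega
    have hlen := pvStepFn_lengths row r m
    refine ⟨by rw [hstep]; omega, by rw [hstep]; omega, ?_⟩
    intro idx hidx
    rw [hstep]
    cases hc : (PySem.Str.strip (row.getD m "")).toList.isEmpty with
    | true =>
      -- empty cell: state unchanged, pvUpdate at m is the identity
      rw [pvStepFn_empty row r m hc, ihp idx hidx]
      by_cases him : idx < m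
      · rw [if_pos him, if_pos (by omega : idx < m + 1)]
      · by_cases him1 : idx < m + 1
        · have hem : idx = m := by omega
          subst hem
          rw [if_neg him, if_pos him1, pvUpdate_in row idx hmr, if_pos hc]
        · rw [if_neg him, if_neg him1]
    | false =>
      -- non-empty cell: only position m changes
      rw [pvStepFn_nonempty row r m hc]
      by_cases him : idx = m
      · subst him
        have h1 : (r.1.set idx true).getD idx false = true := by
          rw [List.getD_eq_getElem _ _ (by simp only [List.length_set]; omega : idx < (r.1.set idx true).length)]
          simp
        have hpair := ihp idx hidx
        rw [if_neg (by omega : ¬ idx < idx)] at hpair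
        have hv2 : r.2.getD idx true = va.getD idx true := congrArg Prod.snd hpair
        have h2 : (if r.2.getD idx true then r.2.set idx (pvGood (PySem.Str.strip (row.getD idx ""))) else r.2).getD idx true
            = (va.getD idx true && pvGood (PySem.Str.strip (row.getD idx ""))) := by
          rw [hv2]
          by_cases hb : va.getD idx true
          · rw [if_pos hb, List.getD_eq_getElem _ _ (by simp only [List.length_set]; omega : idx < (r.2.set idx (pvGood (PySem.Str.strip (row.getD idx ""))) ).length), hb]
            simp
          · rw [if_neg hb, hv2, show va.getD idx true = false by simpa using hb]
            simp
        rw [h1, h2, if_pos (by omega : idx < idx + 1), pvUpdate_in row idx hmr,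
          if_neg (show ¬ (PySem.Str.strip (row.getD idx "")).toList.isEmpty = true by rw [hc]; decide)]
      · have h1 : (r.1.set m true).getD idx false = r.1.getD idx false := by
          rw [List.getD_eq_getElem _ _ (by simp only [List.length_set]; omega : idx < (r.1.set m true).length),
            List.getD_eq_getElem _ _ (by omega : idx < r.1.length)]
          exact List.getElem_set_ne (by omega : m ≠ idx) _
        have h2 : (if r.2.getD m true then r.2.set m (pvGood (PySem.Str.strip (row.getD m ""))) else r.2).getD idx true
            = r.2.getD idx true := by
          by_cases hb : r.2.getD m true
          · rw [if_pos hb, List.getD_eq_getElem _ _ (by simp only [List.length_set]; omega : idx < (r.2.set m (pvGood (PySem.Str.strip (row.getD m ""))) ).length),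
              List.getD_eq_getElem _ _ (by omega : idx < r.2.length)]
            exact List.getElem_set_ne (by omega : m ≠ idx) _
          · rw [if_neg hb]
        rw [h1, h2, ihp idx hidx]
        have hiff : (idx < m + 1) ↔ (idx < m) := by omega
        simp only [hiff]

theorem pvRowStep_spec (n : Nat) (row : List String) (se va : List Bool)
    (hs : se.length = n) (hv : va.length = n) :
    (pvRowStep n row (se, va)).1.length = n ∧
    (pvRowStep n row (se, va)).2.length = n ∧
    ∀ idx, idx < n →
      ((pvRowStep n row (se, va)).1.getD idx false, (pvRowStep n row (se, va)).2.getD idx true)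
        = pvUpdate row idx (se.getD idx false, va.getD idx true) := by
  obtain ⟨h1, h2, hp⟩ := pvRowFold_aux row n (min n row.length) (le_refl _) se va hs hv
  unfold pvRowStep
  refine ⟨h1, h2, ?_⟩
  intro idx hidx
  rw [hp idx hidx]
  by_cases him : idx < min n row.length
  · rw [if_pos him]
  · rw [if_neg him]
    have hir : ¬ idx < row.length := by omega
    rw [pvUpdate_out row idx hir]

theorem pvOuter (rows : List (List String)) (n : Nat) :
    ∀ (se va : List Bool), se.length = n → va.length = n →
      (rows.foldl (fun sv row => pvRowStep n row sv) (se, va)).1.length = n ∧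
      (rows.foldl (fun sv row => pvRowStep n row sv) (se, va)).2.length = n ∧
      ∀ idx, idx < n →
        ((rows.foldl (fun sv row => pvRowStep n row sv) (se, va)).1.getD idx false,
          (rows.foldl (fun sv row => pvRowStep n row sv) (se, va)).2.getD idx true)
          = pvColFold rows idx (se.getD idx false, va.getD idx true) := by
  induction rows with
  | nil => intro se va hs hv; exact ⟨hs, hv, fun idx _ => by simp [pvColFold]⟩
  | cons row rs ih =>
    intro se va hs hv
    obtain ⟨h1, h2, hp⟩ := pvRowStep_spec n row se va hs hv
    have heta : pvRowStep n row (se, va)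
        = ((pvRowStep n row (se, va)).1, (pvRowStep n row (se, va)).2) := rfl
    obtain ⟨g1, g2, gp⟩ := ih (pvRowStep n row (se, va)).1 (pvRowStep n row (se, va)).2 h1 h2
    rw [List.foldl_cons, heta]
    refine ⟨g1, g2, ?_⟩
    intro idx hidx
    rw [gp idx hidx, hp idx hidx]
    simp [pvColFold]

theorem pvColFold_eq (rows : List (List String)) (idx : Nat) (sv : Bool × Bool) :
    pvColFold rows idx sv
      = (sv.1 || !(pvSample rows idx).isEmpty, sv.2 && (pvSample rows idx).all pvGood) := by
  induction rows generalizing sv with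
  | nil => simp [pvColFold, pvSample]
  | cons row rs ih =>
    simp only [pvColFold, List.foldl_cons] at *
    by_cases h1 : idx < row.length
    · by_cases h2 : PySem.Chars.strip (row[idx]'h1).toList = []
      · rw [show pvUpdate row idx sv = sv by simp [pvUpdate, h1, h2]]
        rw [ih]
        simp [pvSample, h1, h2]
      · rw [show pvUpdate row idx sv
            = (true, sv.2 && pvGood (PySem.Str.strip (row.getD idx ""))) by
              simp [pvUpdate, h1, h2]]
        rw [ih]
        simp [pvSample, h1, h2, Bool.and_assoc]
    · rw [show pvUpdate row idx sv = sv by simp [pvUpdate, h1, String.toList]]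
      rw [ih]
      simp [pvSample, h1]

theorem pvScanB_eq_aFind (data_rows : List (List String)) (n : Nat)
    (st : List Bool × List Bool)
    (hst : ∀ idx, idx < n →
      (st.1.getD idx false, st.2.getD idx true)
        = (!(pvSample (PySem.List.slice data_rows none (some 200)) idx).isEmpty,
           (pvSample (PySem.List.slice data_rows none (some 200)) idx).all pvGood))
    (idxs : List Nat) (hsub : ∀ i ∈ idxs, i < n) :
    pvScanB st idxs = pvAFind data_rows idxs := by
  induction idxs with
  | nil => rfl
  | cons idx rest ih =>
    simp only [pvScanB, pvAFind]
    have hpair := hst idx (hsub idx (List.mem_cons_self ..))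
    have hseen : st.1.getD idx false
        = !(pvSample (PySem.List.slice data_rows none (some 200)) idx).isEmpty :=
      congrArg Prod.fst hpair
    have hvalid : st.2.getD idx true
        = (pvSample (PySem.List.slice data_rows none (some 200)) idx).all pvGood :=
      congrArg Prod.snd hpair
    rw [hseen, hvalid, ih (fun i hi => hsub i (List.mem_cons_of_mem _ hi))]
    by_cases he : (pvSample (PySem.List.slice data_rows none (some 200)) idx).isEmpty
    · simp [he]
    · by_cases ha : (pvSample (PySem.List.slice data_rows none (some 200)) idx).all pvGood
      · simp [he, ha]
      · simp [he, ha]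

-- ===== VERDICT (by name: the statement is the Claim_ definition above) =====
theorem find_month_index_py_spec : Claim_equal_find_month_index_py := by
  intro data_rows header _
  unfold Spec_find_month_index_py find_month_index_py find_month_index_py_alt
  obtain ⟨-, -, hp⟩ := pvOuter (PySem.List.slice data_rows none (some 200)) header.length
    (List.replicate header.length false) (List.replicate header.length true)
    (by simp) (by simp)
  refine (pvScanB_eq_aFind data_rows header.length _ ?_ _ (fun i hi => List.mem_range.mp hi)).symm
  intro idx hidx
  rw [hp idx hidx]
  have hse : (List.replicate header.length false).getD idx false = false := by
    simp [List.getD]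
  have hva : (List.replicate header.length true).getD idx true = true := by
    simp [List.getD]
  rw [hse, hva, pvColFold_eq]
  simp
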